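-- pv_equiv track=rewrite | github.com/fionavatar/cuvilliez-project-se | src/dataCompressing.py | nombreBits
-- ===== SOURCE A (Python) =====
-- def nombreBits ( liste ) :
--     """
--     Calcule le nombre de bits nécessaire à la conpression.
--     Astuce on a uniquement besoin de calculer pour l'entier max.
--     Pour les entiers positifs uniquement.
--
--     En entrée :
--     l : array d'entiers
--
--     En sortie :
--     k : un entier
--     """
--     maxValue = max(liste)
--     if maxValue == 0 :
--         k = 1
--     else :
--         bin = ""
--         while maxValue > 0 :
--             bin = bin + str(maxValue%2)
--             maxValue = maxValue // 2
--             k = len(bin)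
--     return k
-- ===== SOURCE B (Python) =====
-- def nombreBits(liste):
--     m = max(liste)
--     if m < 0:
--         raise ValueError("nombreBits: entiers positifs uniquement")
--     return max(m.bit_length(), 1)
-- ===== Notes on version B (the rewrite author's own statement) =====
-- stated objective: idiomatic
-- what changed: B replaces A's digit-by-digit string-building division loop with the closed form max(max(liste).bit_length(), 1), raising explicitly on a negative maximum where A raises UnboundLocalError.
import Mathlib
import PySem

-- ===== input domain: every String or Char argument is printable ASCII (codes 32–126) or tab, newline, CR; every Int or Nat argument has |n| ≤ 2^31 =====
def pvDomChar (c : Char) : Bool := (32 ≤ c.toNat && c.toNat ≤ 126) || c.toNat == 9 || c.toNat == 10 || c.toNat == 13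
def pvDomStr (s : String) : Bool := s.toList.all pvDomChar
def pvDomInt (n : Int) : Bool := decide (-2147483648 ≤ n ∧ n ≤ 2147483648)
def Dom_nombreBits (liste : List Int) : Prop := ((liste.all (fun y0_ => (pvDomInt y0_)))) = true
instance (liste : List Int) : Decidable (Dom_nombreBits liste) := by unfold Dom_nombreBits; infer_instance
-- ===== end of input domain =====

-- B replaces A's digit-by-digit string-building division loop with the closed form max(bit_length, 1); equally fast, more idiomatic.

-- ===== PORT A =====
-- A's while loop: bin grows one binary digit per iteration, k tracks len(bin); state (bin, k, maxValue).
def nbLoopA (bin : List Char) (k : Int) (m : Int) : Int :=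
  if 0 < m then
    let bin' := bin ++ (PySem.Int.toStr (PySem.Int.mod m 2)).toList
    nbLoopA bin' (bin'.length : Int) (PySem.Int.floordiv m 2)
  else k
termination_by m.toNat
decreasing_by
  rw [PySem.Int.floordiv_eq_ediv_of_pos (by omega)]
  omega

def nombreBits (liste : List Int) : Int :=
  match PySem.List.max? liste (fun x => x) with
  | none => 0        -- Python raises ValueError on the empty list; excluded by Pre_
  | some maxValue =>
    if maxValue = 0 then 1
    else nbLoopA [] 0 maxValue   -- for maxValue < 0 Python raises UnboundLocalError (k unbound); excluded by Pre_

-- ===== PORT B =====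
def nombreBits_alt (liste : List Int) : Int :=
  match PySem.List.max? liste (fun x => x) with
  | none => 0        -- max([]) raises ValueError; excluded by Pre_
  | some m =>
    if m < 0 then 0  -- B raises ValueError here (entiers positifs uniquement); excluded by Pre_
    else max ((PySem.Int.bitLength m : Nat) : Int) 1

-- ===== PRECONDITION & SPEC =====
-- Pre_ excludes the empty list (max raises ValueError in both) and lists with negative maximum
-- (A raises UnboundLocalError — its while loop never runs so k is unbound — and B raises ValueError).
def Pre_nombreBits (liste : List Int) : Prop := liste ≠ [] ∧ ∃ x ∈ liste, 0 ≤ x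
instance (liste : List Int) : Decidable (Pre_nombreBits liste) := by unfold Pre_nombreBits; infer_instance
def pvWitness_nombreBits : List Int := ([5, 3, 0])

def Spec_nombreBits (liste : List Int) (out : Int) : Prop := out = nombreBits_alt liste
instance (liste : List Int) (out : Int) : Decidable (Spec_nombreBits liste out) := by unfold Spec_nombreBits; infer_instance

-- ===== CLAIM (what is proved, stated in full; the proofs are below) =====
def Claim_equal_nombreBits : Prop := ∀ (liste : List Int), Dom_nombreBits liste → Pre_nombreBits liste → Spec_nombreBits liste (nombreBits liste)

-- ===== LEMMAS AND PROOFS =====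

-- A's loop counts exactly bitLength m division steps (for positive m), on top of the bin built so far.
theorem nbLoopA_eq (n : Nat) : ∀ (m : Int), m.toNat = n → 0 < m →
    ∀ (bin : List Char) (k : Int), nbLoopA bin k m = (bin.length : Int) + (PySem.Int.bitLength m : Int) := by
  induction n using Nat.strong_induction_on with
  | _ n ih =>
    intro m hn hm bin k
    rw [nbLoopA]
    rw [if_pos hm]
    show nbLoopA (bin ++ (PySem.Int.toStr (PySem.Int.mod m 2)).toList) _ _ = _
    have hmod : PySem.Int.mod m 2 = 0 ∨ PySem.Int.mod m 2 = 1 := by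
      have h1 := PySem.Int.mod_nonneg m (b := 2) (by omega)
      have h2 := PySem.Int.mod_lt m (b := 2) (by omega)
      omega
    have hlen : ((PySem.Int.toStr (PySem.Int.mod m 2)).toList).length = 1 := by
      rcases hmod with h | h <;> rw [h] <;> decide
    have hdiv : PySem.Int.floordiv m 2 = m / 2 := PySem.Int.floordiv_eq_ediv_of_pos (by omega)
    have hbl : PySem.Int.bitLength m = PySem.Int.bitLength (PySem.Int.floordiv m 2) + 1 :=
      PySem.Int.bitLength_of_pos hm
    by_cases hpos : 0 < PySem.Int.floordiv m 2
    · rw [ih (PySem.Int.floordiv m 2).toNat (by omega) _ rfl hpos, hbl]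
      simp only [List.length_append, hlen]
      push_cast
      ring
    · -- m = 1: one more unfolding, the loop stops and returns k' = bin.length + 1
      rw [nbLoopA, if_neg hpos]
      have hm1 : m = 1 := by omega
      have hb1 : PySem.Int.bitLength m = 1 := by rw [hm1]; decide
      simp only [List.length_append, hlen, hb1]
      push_cast
      ring

theorem nombreBits_spec_aux (liste : List Int) (_hd : Dom_nombreBits liste)
    (hpre : Pre_nombreBits liste) : nombreBits liste = nombreBits_alt liste := by
  obtain ⟨hne, x, hx, hx0⟩ := hpre
  unfold nombreBits nombreBits_alt
  cases hmax : PySem.List.max? liste (fun x => x) with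
  | none => exact absurd ((PySem.List.max?_eq_none_iff liste (fun x => x)).mp hmax) hne
  | some m =>
    have hmle : x ≤ m := PySem.List.max?_isMax hmax x hx
    have hmneg : ¬ m < 0 := by omega
    show (if m = 0 then 1 else nbLoopA [] 0 m)
        = if m < 0 then 0 else max ((PySem.Int.bitLength m : Nat) : Int) 1
    rw [if_neg hmneg]
    by_cases hm0 : m = 0
    · subst hm0; simp
    · have hmpos : 0 < m := by omega
      rw [if_neg hm0, nbLoopA_eq m.toNat m rfl hmpos [] 0]
      have h1 : 1 ≤ PySem.Int.bitLength m := by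
        rw [PySem.Int.bitLength_of_pos hmpos]; omega
      simp
      omega

-- ===== VERDICT (by name: the statement is the Claim_ definition above) =====
theorem nombreBits_spec : Claim_equal_nombreBits := by
  intro liste hd hpre
  exact nombreBits_spec_aux liste hd hpre
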